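-- pv_equiv track=rewrite | github.com/yylonly/paper-finding-skill | scripts/generate_report.py | classify_venue
-- ===== SOURCE A (Python) =====
-- CCF_A_SE_CONFS = {'ICSE', 'FSE', 'ISSTA', 'PLDI', 'POPL', 'SOSP', 'OOPSLA', 'OSDI', 'FM'}
--
-- CCF_A_SE_JOURNALS = {'TOSEM', 'TSE', 'TOPLAS', 'TSC'}
--
-- CCF_B_SE_CONFS = {'RE', 'CAiSE', 'ECOOP', 'ETAPS', 'ICPC', 'ICFP', 'LCTES', 'MoDELS', 'CP',
--                    'ICSOC', 'SANER', 'ICSME', 'VMCAI', 'ICWS', 'Middleware', 'SAS', 'ESEM', 'ISSRE', 'HotOS'}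
--
-- CCF_B_SE_JOURNALS = {'ASE', 'ESE', 'IETS', 'IST', 'JFP', 'JSEP', 'RE', 'SCP', 'SoSyM', 'STVR', 'SPE',
--                       'JOURNAL OF SOFTWARE EVOLUTION', 'JOURNAL OF SYSTEMS AND SOFTWARE'}
--
-- CCF_A_AI_CONFS = {'AAAI', 'NeurIPS', 'ACL', 'CVPR', 'ICCV', 'ICML', 'IJCAI', 'ECCV'}
--
-- CCF_A_AI_JOURNALS = {'AI', 'TPAMI', 'IJCV', 'JMLR'}
--
-- CCF_B_AI_CONFS = {'EMNLP', 'ECAI', 'ICRA', 'ICAPS', 'ICCBR', 'COLING', 'KR', 'UAI', 'AAMAS', 'PPSN', 'NAACL', 'COLT'}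
--
-- CCF_B_AI_JOURNALS = {'AAMAS', 'CL', 'CVIU', 'DKE', 'EC', 'TAC', 'TASLP', 'TCYB', 'TEC', 'TFS', 'TNNLS',
--                       'IJAR', 'JAIR', 'JAR', 'JSLHR', 'ML', 'NC', 'NN', 'PR', 'TACL'}
--
-- EXCLUDE_KEYWORDS = {'REMOTE', 'SMARTGREENS', 'VEHITS', 'IFM', 'NFM', 'TALN', 'RECITAL',
--                     'ENASE', 'ITICSE', 'EQUITY', 'DIVERSITY', 'INCLUSION', 'FORMALISE', 'AI ETHICS', 'PANAFRICON'}
--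
-- def classify_venue(venue_upper):
--     if any(ex in venue_upper for ex in EXCLUDE_KEYWORDS):
--         return 'OTHER', ''
--     tokens = set(venue_upper.split())
--     if tokens & CCF_A_SE_CONFS:
--         return 'CCF-A SE', 'conference'
--     if tokens & CCF_A_SE_JOURNALS:
--         return 'CCF-A SE', 'journal'
--     if tokens & CCF_B_SE_CONFS:
--         return 'CCF-B SE', 'conference'
--     if tokens & CCF_B_SE_JOURNALS:
--         return 'CCF-B SE', 'journal'
--     if tokens & CCF_A_AI_CONFS:
--         return 'CCF-A AI', 'conference'
--     if tokens & CCF_A_AI_JOURNALS: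
--         return 'CCF-A AI', 'journal'
--     if tokens & CCF_B_AI_CONFS:
--         return 'CCF-B AI', 'conference'
--     if tokens & CCF_B_AI_JOURNALS:
--         return 'CCF-B AI', 'journal'
--     return 'OTHER', ''
-- ===== SOURCE B (Python) =====
-- CCF_A_SE_CONFS = {'ICSE', 'FSE', 'ISSTA', 'PLDI', 'POPL', 'SOSP', 'OOPSLA', 'OSDI', 'FM'}
--
-- CCF_A_SE_JOURNALS = {'TOSEM', 'TSE', 'TOPLAS', 'TSC'}
--
-- CCF_B_SE_CONFS = {'RE', 'CAiSE', 'ECOOP', 'ETAPS', 'ICPC', 'ICFP', 'LCTES', 'MoDELS', 'CP',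
--                    'ICSOC', 'SANER', 'ICSME', 'VMCAI', 'ICWS', 'Middleware', 'SAS', 'ESEM', 'ISSRE', 'HotOS'}
--
-- CCF_B_SE_JOURNALS = {'ASE', 'ESE', 'IETS', 'IST', 'JFP', 'JSEP', 'RE', 'SCP', 'SoSyM', 'STVR', 'SPE',
--                       'JOURNAL OF SOFTWARE EVOLUTION', 'JOURNAL OF SYSTEMS AND SOFTWARE'}
--
-- CCF_A_AI_CONFS = {'AAAI', 'NeurIPS', 'ACL', 'CVPR', 'ICCV', 'ICML', 'IJCAI', 'ECCV'}
--
-- CCF_A_AI_JOURNALS = {'AI', 'TPAMI', 'IJCV', 'JMLR'}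
--
-- CCF_B_AI_CONFS = {'EMNLP', 'ECAI', 'ICRA', 'ICAPS', 'ICCBR', 'COLING', 'KR', 'UAI', 'AAMAS', 'PPSN', 'NAACL', 'COLT'}
--
-- CCF_B_AI_JOURNALS = {'AAMAS', 'CL', 'CVIU', 'DKE', 'EC', 'TAC', 'TASLP', 'TCYB', 'TEC', 'TFS', 'TNNLS',
--                       'IJAR', 'JAIR', 'JAR', 'JSLHR', 'ML', 'NC', 'NN', 'PR', 'TACL'}
--
-- EXCLUDE_KEYWORDS = {'REMOTE', 'SMARTGREENS', 'VEHITS', 'IFM', 'NFM', 'TALN', 'RECITAL',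
--                     'ENASE', 'ITICSE', 'EQUITY', 'DIVERSITY', 'INCLUSION', 'FORMALISE', 'AI ETHICS', 'PANAFRICON'}
--
-- # priority-ordered rules, first matching rule wins
-- _RULES = [(CCF_A_SE_CONFS, ('CCF-A SE', 'conference')),
--           (CCF_A_SE_JOURNALS, ('CCF-A SE', 'journal')),
--           (CCF_B_SE_CONFS, ('CCF-B SE', 'conference')),
--           (CCF_B_SE_JOURNALS, ('CCF-B SE', 'journal')),
--           (CCF_A_AI_CONFS, ('CCF-A AI', 'conference')),
--           (CCF_A_AI_JOURNALS, ('CCF-A AI', 'journal')),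
--           (CCF_B_AI_CONFS, ('CCF-B AI', 'conference')),
--           (CCF_B_AI_JOURNALS, ('CCF-B AI', 'journal'))]
--
-- # inverted index: keyword -> index of the highest-priority rule containing it
-- _INDEX = {}
-- for _i, (_kws, _res) in enumerate(_RULES):
--     for _kw in _kws:
--         _INDEX.setdefault(_kw, _i)
--
--
-- def classify_venue(venue_upper):
--     if any(ex in venue_upper for ex in EXCLUDE_KEYWORDS):
--         return 'OTHER', ''
--     best = None
--     for tok in venue_upper.split():
--         i = _INDEX.get(tok)
--         if i is not None and (best is None or i < best):
--             best = i
--     if best is None: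
--         return 'OTHER', ''
--     return _RULES[best][1]
-- ===== Notes on version B (the rewrite author's own statement) =====
-- stated objective: alternative
-- what changed: Replaces A's eight sequential token-set/keyword-set intersection tests by a keyword-to-rule-priority inverted index built once (first rule wins for keywords in several sets) plus a single running-minimum pass over the tokens that returns the highest-priority matching rule.
import Mathlib
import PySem

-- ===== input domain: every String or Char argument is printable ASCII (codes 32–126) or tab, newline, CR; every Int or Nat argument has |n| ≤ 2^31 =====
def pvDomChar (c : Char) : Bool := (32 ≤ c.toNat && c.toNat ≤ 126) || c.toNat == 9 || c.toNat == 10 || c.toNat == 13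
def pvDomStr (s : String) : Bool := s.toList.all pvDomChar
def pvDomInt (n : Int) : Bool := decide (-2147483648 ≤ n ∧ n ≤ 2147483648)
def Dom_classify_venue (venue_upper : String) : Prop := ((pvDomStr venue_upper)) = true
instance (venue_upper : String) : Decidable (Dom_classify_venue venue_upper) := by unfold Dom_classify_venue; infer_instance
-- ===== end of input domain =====

-- B replaces A's eight sequential set-intersection checks by a keyword→rule-priority inverted
-- index built once, plus a single min-priority pass over the tokens (objective: alternative).

-- ===== PORT A =====
def pvCCF_A_SE_CONFS : List String := ["ICSE", "FSE", "ISSTA", "PLDI", "POPL", "SOSP", "OOPSLA", "OSDI", "FM"]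
def pvCCF_A_SE_JOURNALS : List String := ["TOSEM", "TSE", "TOPLAS", "TSC"]
def pvCCF_B_SE_CONFS : List String := ["RE", "CAiSE", "ECOOP", "ETAPS", "ICPC", "ICFP", "LCTES", "MoDELS", "CP",
  "ICSOC", "SANER", "ICSME", "VMCAI", "ICWS", "Middleware", "SAS", "ESEM", "ISSRE", "HotOS"]
def pvCCF_B_SE_JOURNALS : List String := ["ASE", "ESE", "IETS", "IST", "JFP", "JSEP", "RE", "SCP", "SoSyM", "STVR", "SPE",
  "JOURNAL OF SOFTWARE EVOLUTION", "JOURNAL OF SYSTEMS AND SOFTWARE"]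
def pvCCF_A_AI_CONFS : List String := ["AAAI", "NeurIPS", "ACL", "CVPR", "ICCV", "ICML", "IJCAI", "ECCV"]
def pvCCF_A_AI_JOURNALS : List String := ["AI", "TPAMI", "IJCV", "JMLR"]
def pvCCF_B_AI_CONFS : List String := ["EMNLP", "ECAI", "ICRA", "ICAPS", "ICCBR", "COLING", "KR", "UAI", "AAMAS", "PPSN", "NAACL", "COLT"]
def pvCCF_B_AI_JOURNALS : List String := ["AAMAS", "CL", "CVIU", "DKE", "EC", "TAC", "TASLP", "TCYB", "TEC", "TFS", "TNNLS",
  "IJAR", "JAIR", "JAR", "JSLHR", "ML", "NC", "NN", "PR", "TACL"]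
def pvEXCLUDE_KEYWORDS : List String := ["REMOTE", "SMARTGREENS", "VEHITS", "IFM", "NFM", "TALN", "RECITAL",
  "ENASE", "ITICSE", "EQUITY", "DIVERSITY", "INCLUSION", "FORMALISE", "AI ETHICS", "PANAFRICON"]

-- 'tokens & S' truthiness: the intersection is non-empty iff some token is in S
def pvHits (tokens : PySem.Set String) (S : List String) : Bool := tokens.any (fun t => S.contains t)

def classify_venue (venue_upper : String) : String × String :=
  if pvEXCLUDE_KEYWORDS.any (fun ex => PySem.Str.isIn ex venue_upper) then ("OTHER", "")
  else
    let tokens : PySem.Set String := PySem.Set.ofList (PySem.Str.split₀ venue_upper)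
    if pvHits tokens pvCCF_A_SE_CONFS then ("CCF-A SE", "conference")
    else if pvHits tokens pvCCF_A_SE_JOURNALS then ("CCF-A SE", "journal")
    else if pvHits tokens pvCCF_B_SE_CONFS then ("CCF-B SE", "conference")
    else if pvHits tokens pvCCF_B_SE_JOURNALS then ("CCF-B SE", "journal")
    else if pvHits tokens pvCCF_A_AI_CONFS then ("CCF-A AI", "conference")
    else if pvHits tokens pvCCF_A_AI_JOURNALS then ("CCF-A AI", "journal")
    else if pvHits tokens pvCCF_B_AI_CONFS then ("CCF-B AI", "conference")
    else if pvHits tokens pvCCF_B_AI_JOURNALS then ("CCF-B AI", "journal")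
    else ("OTHER", "")

-- ===== PORT B =====
def pvRules : List (List String × (String × String)) :=
  [(pvCCF_A_SE_CONFS, ("CCF-A SE", "conference")),
   (pvCCF_A_SE_JOURNALS, ("CCF-A SE", "journal")),
   (pvCCF_B_SE_CONFS, ("CCF-B SE", "conference")),
   (pvCCF_B_SE_JOURNALS, ("CCF-B SE", "journal")),
   (pvCCF_A_AI_CONFS, ("CCF-A AI", "conference")),
   (pvCCF_A_AI_JOURNALS, ("CCF-A AI", "journal")),
   (pvCCF_B_AI_CONFS, ("CCF-B AI", "conference")),
   (pvCCF_B_AI_JOURNALS, ("CCF-B AI", "journal"))]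

-- inner loop of the index build: _INDEX.setdefault(kw, i) for each keyword of rule i
def pvAddRule (d : PySem.Dict String Nat) (i : Nat) : List String → PySem.Dict String Nat
  | [] => d
  | k :: ks => pvAddRule (d.setdefault k i) i ks

-- outer loop over enumerate(_RULES)
def pvBuild (d : PySem.Dict String Nat) (i : Nat) : List (List String × (String × String)) → PySem.Dict String Nat
  | [] => d
  | r :: rs => pvBuild (pvAddRule d i r.1) (i + 1) rs

def pvIndex : PySem.Dict String Nat := pvBuild PySem.Dict.empty 0 pvRules

-- the single pass: best = min rule index among tokens found in the index (_INDEX.get(tok))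
def pvBestLoop (idx : PySem.Dict String Nat) (best : Option Nat) : List String → Option Nat
  | [] => best
  | t :: ts =>
      pvBestLoop idx
        (match idx.get? t, best with
         | some i, none => some i
         | some i, some b => if i < b then some i else some b
         | none, b => b) ts

def classify_venue_alt (venue_upper : String) : String × String :=
  if pvEXCLUDE_KEYWORDS.any (fun ex => PySem.Str.isIn ex venue_upper) then ("OTHER", "")
  else
    match pvBestLoop pvIndex none (PySem.Str.split₀ venue_upper) with
    | none => ("OTHER", "")
    | some b =>
        match pvRules[b]? with   -- _RULES[best][1]; the index always holds indices < 8
        | some r => r.2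
        | none => ("OTHER", "")

-- ===== PRECONDITION & SPEC =====
def Spec_classify_venue (venue_upper : String) (out : String × String) : Prop := out = classify_venue_alt venue_upper
instance (venue_upper : String) (out : String × String) : Decidable (Spec_classify_venue venue_upper out) := by unfold Spec_classify_venue; infer_instance

-- ===== CLAIM (what is proved, stated in full; the proofs are below) =====
def Claim_equal_classify_venue : Prop := ∀ (venue_upper : String), Dom_classify_venue venue_upper → Spec_classify_venue venue_upper (classify_venue venue_upper)

-- ===== LEMMAS AND PROOFS =====

-- first rule index ≥ i (within rs) whose keyword list contains t
def pvFirst (i : Nat) : List (List String × (String × String)) → String → Option Nat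
  | [], _ => none
  | r :: rs, t => if r.1.contains t then some i else pvFirst (i + 1) rs t

-- index (within rs) of the first rule met by some token of ts
def pvCascadeIdx (ts : List String) : List (List String × (String × String)) → Option Nat
  | [] => none
  | r :: rs => if ts.any (fun t => r.1.contains t) then some 0 else (pvCascadeIdx ts rs).map (· + 1)

-- A's cascade, abstractly over a rule list
def pvCascade (ts : List String) : List (List String × (String × String)) → String × String
  | [] => ("OTHER", "")
  | r :: rs => if ts.any (fun t => r.1.contains t) then r.2 else pvCascade ts rs

theorem pvAddRule_get? (ks : List String) (d : PySem.Dict String Nat) (i : Nat) (t : String) :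
    (pvAddRule d i ks).get? t = (d.get? t).or (if ks.contains t then some i else none) := by
  induction ks generalizing d with
  | nil => cases h : d.get? t <;> simp [pvAddRule, h]
  | cons k ks ih =>
    simp only [pvAddRule, ih]
    by_cases hk : t = k
    · subst hk
      rw [PySem.Dict.get?_setdefault_self]
      cases h : d.get? t <;> simp
    · rw [PySem.Dict.get?_setdefault_of_ne d i hk]
      cases h : d.get? t <;> simp [hk]

theorem pvBuild_get? (rs : List (List String × (String × String))) (d : PySem.Dict String Nat) (i : Nat) (t : String) :
    (pvBuild d i rs).get? t = (d.get? t).or (pvFirst i rs t) := by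
  induction rs generalizing d i with
  | nil => cases h : d.get? t <;> simp [pvBuild, pvFirst, h]
  | cons r rs ih =>
    simp only [pvBuild, ih, pvAddRule_get?, pvFirst]
    cases h : d.get? t
    · simp only [Option.none_or]
      by_cases hc : r.1.contains t
      · rw [if_pos hc, if_pos hc]; rfl
      · rw [if_neg hc, if_neg hc]; simp
    · simp

theorem pvIndex_get? (t : String) : pvIndex.get? t = pvFirst 0 pvRules t := by
  rw [pvIndex, pvBuild_get?, PySem.Dict.get?_empty, Option.none_or]

theorem pvFirst_ge {i v : Nat} {rs : List (List String × (String × String))} {t : String}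
    (h : pvFirst i rs t = some v) : i ≤ v := by
  induction rs generalizing i with
  | nil => simp [pvFirst] at h
  | cons r rs ih =>
    simp only [pvFirst] at h
    split at h
    · simp only [Option.some.injEq] at h
      omega
    · have := ih h; omega

def pvStep (f : String → Option Nat) (acc : Option Nat) (t : String) : Option Nat :=
  match f t, acc with
  | some i, none => some i
  | some i, some b => if i < b then some i else some b
  | none, b => b

-- the running-minimum loop of B is a fold of pvStep over the index lookups
theorem pvBestLoop_eq (idx : PySem.Dict String Nat) (ts : List String) (a : Option Nat) :
    pvBestLoop idx a ts = ts.foldl (pvStep (fun t => idx.get? t)) a := by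
  induction ts generalizing a with
  | nil => rfl
  | cons t ts ih =>
    simp only [pvBestLoop, List.foldl_cons, pvStep]
    exact ih _

theorem pvFold_none {f : String → Option Nat} {ts : List String} (h : ∀ t ∈ ts, f t = none)
    (a : Option Nat) : ts.foldl (pvStep f) a = a := by
  induction ts generalizing a with
  | nil => rfl
  | cons t ts ih =>
    have ht := h t (by simp)
    simp only [List.foldl_cons, pvStep, ht]
    exact ih (fun x hx => h x (by simp [hx])) a

theorem pvFold_congr {f g : String → Option Nat} {ts : List String} (h : ∀ t ∈ ts, f t = g t)
    (a : Option Nat) : ts.foldl (pvStep f) a = ts.foldl (pvStep g) a := by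
  induction ts generalizing a with
  | nil => rfl
  | cons t ts ih =>
    simp only [List.foldl_cons, pvStep, h t (by simp)]
    exact ih (fun x hx => h x (by simp [hx])) _

-- if some token (or the accumulator) attains i and every value is ≥ i, the running minimum is i
theorem pvFold_min {f : String → Option Nat} {i : Nat} :
    ∀ (ts : List String) (a : Option Nat),
    ((∃ t ∈ ts, f t = some i) ∨ a = some i) →
    (∀ t ∈ ts, ∀ v, f t = some v → i ≤ v) →
    (∀ v, a = some v → i ≤ v) →
    ts.foldl (pvStep f) a = some i := by
  intro ts
  induction ts with
  | nil =>
    intro a hex _ _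
    rcases hex with ⟨t, ht, _⟩ | ha
    · simp at ht
    · simpa using ha
  | cons t ts ih =>
    intro a hex hge hacc
    simp only [List.foldl_cons]
    have hge' : ∀ x ∈ ts, ∀ v, f x = some v → i ≤ v := fun x hx => hge x (by simp [hx])
    have hstep : ∀ v, pvStep f a t = some v → i ≤ v := by
      intro v hv
      unfold pvStep at hv
      cases hf : f t with
      | none => simp only [hf] at hv; exact hacc v hv
      | some j =>
        have hij : i ≤ j := hge t (by simp) j hf
        cases ha : a with
        | none =>
          simp only [hf, ha, Option.some.injEq] at hv
          omega
        | some b =>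
          have hib : i ≤ b := hacc b ha
          simp only [hf, ha] at hv
          split at hv <;> simp only [Option.some.injEq] at hv <;> omega
    rcases hex with ⟨x, hx, hfx⟩ | ha
    · rcases List.mem_cons.mp hx with rfl | hx'
      · -- the head token attains i
        apply ih
        · right
          unfold pvStep
          rw [hfx]
          cases ha : a with
          | none => rfl
          | some b =>
            have hib : i ≤ b := hacc b ha
            show (if i < b then some i else some b) = some i
            split
            · rfl
            · simp only [Option.some.injEq]; omega
        · exact hge'
        · exact hstep
      · exact ih _ (Or.inl ⟨x, hx', hfx⟩) hge' hstep
    · apply ih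
      · right
        unfold pvStep
        cases hf : f t with
        | none => rw [ha]
        | some j =>
          have hij : i ≤ j := hge t (by simp) j hf
          rw [ha]
          show (if j < i then some j else some i) = some i
          split
          · simp only [Option.some.injEq]; omega
          · rfl
      · exact hge'
      · exact hstep

-- the min-priority pass over the inverted index computes the cascade's first-matching-rule index
theorem pvFold_first (rs : List (List String × (String × String))) :
    ∀ (i : Nat) (ts : List String),
    ts.foldl (pvStep (pvFirst i rs)) none = (pvCascadeIdx ts rs).map (i + ·) := by
  induction rs with
  | nil =>
    intro i ts
    rw [pvFold_none (f := pvFirst i []) (fun t _ => rfl)]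
    simp [pvCascadeIdx]
  | cons r rs ih =>
    intro i ts
    by_cases h : ts.any (fun t => r.1.contains t)
    · -- some token matches rule r: the minimum is exactly i
      rw [pvCascadeIdx, if_pos h, Option.map_some, Nat.add_zero]
      rcases List.any_eq_true.mp h with ⟨x, hx, hrx⟩
      apply pvFold_min ts none
      · exact Or.inl ⟨x, hx, by simp only [pvFirst, hrx, if_true]⟩
      · intro t _ v hv
        simp only [pvFirst] at hv
        split at hv
        · simp only [Option.some.injEq] at hv
          omega
        · have := pvFirst_ge hv; omega
      · intro v hv; cases hv
    · -- no token matches rule r: drop to the tail at priority i+1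
      have hnone : ∀ t ∈ ts, r.1.contains t = false := by
        intro t ht
        by_contra hc
        exact h (List.any_eq_true.mpr ⟨t, ht, by simpa using hc⟩)
      rw [pvFold_congr (g := pvFirst (i + 1) rs)
            (fun t ht => by simp only [pvFirst, hnone t ht, Bool.false_eq_true, if_false])]
      rw [ih (i + 1) ts, pvCascadeIdx, if_neg h, Option.map_map]
      cases pvCascadeIdx ts rs with
      | none => rfl
      | some k =>
        simp only [Option.map_some, Function.comp]
        congr 1
        omega

-- decoding the cascade index via list lookup is the cascade itself
theorem pvCascade_decode (rs : List (List String × (String × String))) (ts : List String) :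
    (match pvCascadeIdx ts rs with
     | none => (("OTHER" : String), ("" : String))
     | some k => match rs[k]? with
                 | some r => r.2
                 | none => ("OTHER", "")) = pvCascade ts rs := by
  induction rs with
  | nil => simp [pvCascadeIdx, pvCascade]
  | cons r rs ih =>
    by_cases h : ts.any (fun t => r.1.contains t)
    · rw [pvCascadeIdx, if_pos h, pvCascade, if_pos h]
      rfl
    · rw [pvCascadeIdx, if_neg h, pvCascade, if_neg h, ← ih]
      cases pvCascadeIdx ts rs with
      | none => rfl
      | some k => simp

-- A's membership test on the token set equals the test on the token list
theorem pvHits_ofList (ts : List String) (S : List String) :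
    pvHits (PySem.Set.ofList ts) S = ts.any (fun t => S.contains t) := by
  rw [Bool.eq_iff_iff]
  simp only [pvHits, List.any_eq_true]
  constructor
  · rintro ⟨t, ht, hS⟩
    exact ⟨t, (PySem.Set.mem_ofList ts t).mp ht, hS⟩
  · rintro ⟨t, ht, hS⟩
    exact ⟨t, (PySem.Set.mem_ofList ts t).mpr ht, hS⟩

-- ===== VERDICT (by name: the statement is the Claim_ definition above) =====
theorem classify_venue_spec : Claim_equal_classify_venue := by
  intro venue_upper _
  unfold Spec_classify_venue classify_venue classify_venue_alt
  by_cases hex : pvEXCLUDE_KEYWORDS.any (fun ex => PySem.Str.isIn ex venue_upper)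
  · rw [if_pos hex, if_pos hex]
  · rw [if_neg hex, if_neg hex]
    have hb : pvBestLoop pvIndex none (PySem.Str.split₀ venue_upper)
        = pvCascadeIdx (PySem.Str.split₀ venue_upper) pvRules := by
      rw [pvBestLoop_eq]
      have hf : (fun t => pvIndex.get? t) = pvFirst 0 pvRules := by
        funext t; exact pvIndex_get? t
      rw [hf, pvFold_first pvRules 0]
      cases pvCascadeIdx (PySem.Str.split₀ venue_upper) pvRules <;> simp
    rw [hb, pvCascade_decode pvRules (PySem.Str.split₀ venue_upper)]
    simp only [pvCascade, pvRules, pvHits_ofList]
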